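-- pv_equiv track=rewrite | github.com/Carl-Chinatomby/Algorithms-and-Data-Structures | programing_problems/google_code_jam/2016_qualifier/C-coin-jam/coin_jam.py | get_jamcoins
-- ===== SOURCE A (Python) =====
-- def get_jamcoins(jamcoin_len, num_of_examples):
--     """Returns a list of num_of_examples of jamcoins where
--     jamcon_len is jamcoin_len and each row consists of the jamcoin
--     and the ith element (starting from 1) is a divisor for the when
--     the jamcoin is interpreted in base i+1.
--     """
--     retval = []
--     increment = 0
--     while len(retval) < num_of_examples:
--         jamcoin_set = []
--         jamcoin_base10 = int('1{}1'.format('0'*(jamcoin_len-2)), 2) \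
--             + int(increment)
--         jamcoin = bin(jamcoin_base10)[2:]
--         increment += 1
--
--         if not jamcoin.startswith('1') or not jamcoin.endswith('1'):
--             continue
--
--         jamcoin_set.append(jamcoin)
--
--         for i in range(2, 11):
--             ## This was the brute force way that got the lowest divisor
--             ## However it fails on the large dataset due to inefficency
--             # divisor = get_divisor(int(jamcoin, i))
--             # if divisor:
--             #     jamcoin_set.append(str(divisor))
--             # else:
--             #     break
--
--             ## Thie large dataset solution notices that i + 1 must be a divisor
--             ## if the number is a jamcoin, observed from smallfile output
--             if int(jamcoin, i) % (i+1) == 0: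
--                 jamcoin_set.append(str(i+1))
--             else:
--                 break
--
--         if len(jamcoin_set) == 10:
--             retval.append(jamcoin_set)
--
--     return retval
-- ===== SOURCE B (Python) =====
-- def get_jamcoins(jamcoin_len, num_of_examples):
--     """Same results as A: enumerate the same candidates in the same order, but
--     prove all nine divisors from ONE quantity: the alternating bit-sum alt of the
--     candidate string, since base i is ≡ -1 (mod i+1), so int(jamcoin, i) ≡ alt
--     (mod i+1) for every base i = 2..10 -- no base conversions at all."""
--     if num_of_examples <= 0:
--         return []
--     start = int('1' + '0' * (jamcoin_len - 2) + '1', 2)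
--     retval = []
--     candidate = start
--     while len(retval) < num_of_examples:
--         jamcoin = bin(candidate)[2:]
--         candidate += 1
--         if not (jamcoin.startswith('1') and jamcoin.endswith('1')):
--             continue
--         alt = 0
--         sign = 1
--         for ch in reversed(jamcoin):
--             if ch == '1':
--                 alt += sign
--             sign = -sign
--         divisors = [str(m) for m in range(3, 12) if alt % m == 0]
--         if len(divisors) == 9:
--             retval.append([jamcoin] + divisors)
--     return retval
-- ===== Notes on version B (the rewrite author's own statement) =====
-- stated objective: alternative
-- what changed: B keeps A's candidate enumeration but replaces the nine int(jamcoin, i) base conversions (with early break) per candidate by one alternating bit-sum alt of the string, valid because base i is congruent to -1 mod i+1, then selects divisors by alt % m == 0 over m in 3..11 with a comprehension; the start value is also hoisted out of the loop.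
import Mathlib
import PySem

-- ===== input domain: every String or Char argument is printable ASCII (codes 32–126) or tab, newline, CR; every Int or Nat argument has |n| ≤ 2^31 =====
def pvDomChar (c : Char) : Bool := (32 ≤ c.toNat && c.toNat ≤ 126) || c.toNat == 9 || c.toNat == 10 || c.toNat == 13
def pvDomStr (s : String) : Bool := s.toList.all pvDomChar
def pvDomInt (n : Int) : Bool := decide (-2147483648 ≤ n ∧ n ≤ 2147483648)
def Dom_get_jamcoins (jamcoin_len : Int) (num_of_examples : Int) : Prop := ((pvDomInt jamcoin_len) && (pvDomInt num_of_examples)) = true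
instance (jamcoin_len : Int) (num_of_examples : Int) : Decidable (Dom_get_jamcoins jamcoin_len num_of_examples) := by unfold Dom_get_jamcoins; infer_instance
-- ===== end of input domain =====

-- B replaces A's nine int(jamcoin, i) base conversions per candidate by ONE alternating
-- bit-sum that decides all nine divisibility tests (alternative decomposition, same cost class).
-- Both while-loops are ported with the same large fuel counter (a totality guard only:
-- on inputs either Python completes, the loop exits long before the fuel does).

-- ==== shared hand ports of the Python int primitives both sources use ====
-- digit value of a character; exact for the '0'/'1' digits that occur here
def pvDigit (c : Char) : Int := (c.toNat : Int) - 48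
-- hand port of int(s, b): exact for the non-empty plain digit strings (no sign,
-- whitespace, underscore or base prefix, digits < b) that reach it in both programs
def pvParse (b : Int) (cs : List Char) : Int := cs.foldl (fun a c => a * b + pvDigit c) 0
-- hand port of format(m, 'b') for m : Nat (binary digits, msb first)
def pvBinGo (m : Nat) (acc : List Char) : List Char :=
  if m = 0 then acc else pvBinGo (m / 2) ((if m % 2 = 1 then '1' else '0') :: acc)
def pvBinNat (m : Nat) : List Char := if m = 0 then ['0'] else pvBinGo m []
-- hand port of bin(n); exact for every Int n (bin(0) = '0b0', negatives get '-')
def pvPyBin (n : Int) : List Char :=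
  if n < 0 then '-' :: '0' :: 'b' :: pvBinNat n.natAbs else '0' :: 'b' :: pvBinNat n.toNat
-- int('1{}1'.format('0'*(L-2)), 2): build the literal string, then parse it base 2
def pvStart (L : Int) : Int := pvParse 2 ('1' :: (List.replicate (L - 2).toNat '0' ++ ['1']))
-- fuel for the while-loops (totality guard only; never reached on completing runs)
def pvFuel : Nat := 18446744073709551616

-- ===== PORT A =====
-- inner 'for i in range(2, 11)' with its break: test int(jamcoin, i) % (i+1) == 0
def pvInnerA (jam : List Char) (ms : List Int) (acc : List String) : List String :=
  match ms with
  | [] => acc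
  | i :: rest =>
      if PySem.Int.mod (pvParse i jam) (i + 1) = 0 then
        pvInnerA jam rest (acc ++ [PySem.Int.toStr (i + 1)])
      else acc

def pvLoopA (L num : Int) (fuel : Nat) (retval : List (List String)) (inc : Int) :
    List (List String) :=
  match fuel with
  | 0 => retval
  | fuel' + 1 =>
    if (retval.length : Int) < num then
      let n := pvStart L + inc
      let jam := PySem.List.slice (pvPyBin n) (some 2) none
      let inc' := inc + 1
      if PySem.Chars.startswith jam ['1'] && PySem.Chars.endswith jam ['1'] then
        let jamcoin_set := pvInnerA jam (PySem.List.pyRange 2 11 1) [String.ofList jam]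
        if jamcoin_set.length = 10 then pvLoopA L num fuel' (retval ++ [jamcoin_set]) inc'
        else pvLoopA L num fuel' retval inc'
      else pvLoopA L num fuel' retval inc'
    else retval

def get_jamcoins (jamcoin_len : Int) (num_of_examples : Int) : List (List String) :=
  pvLoopA jamcoin_len num_of_examples pvFuel [] 0

-- ===== PORT B =====
-- B's alternating bit-sum: the (alt, sign) fold over reversed(jamcoin)
def pvAlt (jam : List Char) : Int :=
  (jam.reverse.foldl (fun (p : Int × Int) c => (if c = '1' then p.1 + p.2 else p.1, -p.2))
    (0, 1)).1

-- B's divisor list: [str(m) for m in range(3, 12) if alt % m == 0]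
def pvDivisorsB (alt : Int) : List String :=
  ((PySem.List.pyRange 3 12 1).filter (fun m => PySem.Int.mod alt m = 0)).map
    (fun m => PySem.Int.toStr m)

def pvLoopB (num : Int) (fuel : Nat) (retval : List (List String)) (cand : Int) :
    List (List String) :=
  match fuel with
  | 0 => retval
  | fuel' + 1 =>
    if (retval.length : Int) < num then
      let jam := PySem.List.slice (pvPyBin cand) (some 2) none
      let cand' := cand + 1
      if PySem.Chars.startswith jam ['1'] && PySem.Chars.endswith jam ['1'] then
        let divisors := pvDivisorsB (pvAlt jam)
        if divisors.length = 9 then pvLoopB num fuel' (retval ++ [String.ofList jam :: divisors]) cand'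
        else pvLoopB num fuel' retval cand'
      else pvLoopB num fuel' retval cand'
    else retval

def get_jamcoins_alt (jamcoin_len : Int) (num_of_examples : Int) : List (List String) :=
  if num_of_examples ≤ 0 then []
  else pvLoopB num_of_examples pvFuel [] (pvStart jamcoin_len)

-- ===== PRECONDITION & SPEC =====
def Spec_get_jamcoins (jamcoin_len : Int) (num_of_examples : Int) (out : List (List String)) : Prop := out = get_jamcoins_alt jamcoin_len num_of_examples
instance (jamcoin_len : Int) (num_of_examples : Int) (out : List (List String)) : Decidable (Spec_get_jamcoins jamcoin_len num_of_examples out) := by unfold Spec_get_jamcoins; infer_instance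

-- ===== CLAIM (what is proved, stated in full; the proofs are below) =====
def Claim_equal_get_jamcoins : Prop := ∀ (jamcoin_len : Int) (num_of_examples : Int), Dom_get_jamcoins jamcoin_len num_of_examples → Spec_get_jamcoins jamcoin_len num_of_examples (get_jamcoins jamcoin_len num_of_examples)

-- ===== LEMMAS AND PROOFS =====

-- mathematical alternating sum, folded from the left
def pvAltM (cs : List Char) : Int :=
  cs.foldl (fun a c => (if c = '1' then 1 else 0) - a) 0

lemma pvAltM_append (cs : List Char) (c : Char) :
    pvAltM (cs ++ [c]) = (if c = '1' then 1 else 0) - pvAltM cs := by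
  simp [pvAltM, List.foldl_append]

lemma pvAlt_fold_eq (rs : List Char) (a s : Int) :
    (rs.foldl (fun (p : Int × Int) c => (if c = '1' then p.1 + p.2 else p.1, -p.2)) (a, s)).1
      = a + s * pvAltM rs.reverse := by
  induction rs generalizing a s with
  | nil => simp [pvAltM]
  | cons c rs ih =>
      simp only [List.foldl_cons]
      rcases Decidable.em (c = '1') with h | h
      · simp [h, ih, pvAltM_append, mul_sub]
        ring
      · simp [h, ih, pvAltM_append]

lemma pvAlt_eq_pvAltM (cs : List Char) : pvAlt cs = pvAltM cs := by
  have h := pvAlt_fold_eq cs.reverse 0 1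
  rw [List.reverse_reverse] at h
  unfold pvAlt
  rw [h]; ring

-- the congruence: base b reads a binary string to alt (mod b+1), since b ≡ -1
lemma pvParse_sub_altM_dvd (b : Int) (cs : List Char)
    (hbin : ∀ c ∈ cs, c = '0' ∨ c = '1') :
    (b + 1) ∣ (pvParse b cs - pvAltM cs) := by
  induction cs using List.reverseRecOn with
  | nil => simp [pvParse, pvAltM]
  | append_singleton cs c ih =>
      have hc : c = '0' ∨ c = '1' := hbin c (by simp)
      have hcs : ∀ x ∈ cs, x = '0' ∨ x = '1' := fun x hx => hbin x (by simp [hx])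
      have hdc : pvDigit c = (if c = '1' then 1 else 0) := by
        rcases hc with h | h <;> simp [h, pvDigit]
      have hstep : pvParse b (cs ++ [c]) = pvParse b cs * b + pvDigit c := by
        simp [pvParse, List.foldl_append]
      rw [hstep, pvAltM_append, hdc]
      have : pvParse b cs * b + (if c = '1' then 1 else 0)
          - ((if c = '1' then 1 else 0) - pvAltM cs)
          = pvParse b cs * (b + 1) - (pvParse b cs - pvAltM cs) := by ring
      rw [this]
      exact dvd_sub ⟨pvParse b cs, by ring⟩ (ih hcs)

lemma pvCond_eq (b : Int) (cs : List Char)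
    (hbin : ∀ c ∈ cs, c = '0' ∨ c = '1') :
    (PySem.Int.mod (pvParse b cs) (b + 1) = 0) ↔ (PySem.Int.mod (pvAlt cs) (b + 1) = 0) := by
  rw [PySem.Int.mod_eq_zero_iff_dvd, PySem.Int.mod_eq_zero_iff_dvd, pvAlt_eq_pvAltM]
  constructor
  · intro h
    have := dvd_sub h (pvParse_sub_altM_dvd b cs hbin)
    simpa using this
  · intro h
    have := dvd_add h (pvParse_sub_altM_dvd b cs hbin)
    simpa using this

-- A's inner loop is an accumulated takeWhile
lemma pvInnerA_eq (jam : List Char) (ms : List Int) (acc : List String) :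
    pvInnerA jam ms acc
      = acc ++ (ms.takeWhile (fun i => PySem.Int.mod (pvParse i jam) (i + 1) = 0)).map
          (fun i => PySem.Int.toStr (i + 1)) := by
  induction ms generalizing acc with
  | nil => simp [pvInnerA]
  | cons i rest ih =>
      rw [pvInnerA]
      by_cases h : PySem.Int.mod (pvParse i jam) (i + 1) = 0
      · simp [h, ih]
      · simp [h]

-- the binary digits produced by the hand bin port
lemma pvBinGo_binary (m : Nat) (acc : List Char)
    (hacc : ∀ c ∈ acc, c = '0' ∨ c = '1') :
    ∀ c ∈ pvBinGo m acc, c = '0' ∨ c = '1' := by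
  induction m using Nat.strong_induction_on generalizing acc with
  | _ m ih =>
      rw [pvBinGo]
      by_cases h : m = 0
      · simpa [h] using hacc
      · simp only [h, if_false]
        exact ih (m / 2) (Nat.div_lt_self (Nat.pos_of_ne_zero h) (by norm_num)) _
          (by
            intro c hc
            rcases List.mem_cons.mp hc with h | h
            · rw [h]; by_cases hm : m % 2 = 1 <;> simp [hm]
            · exact hacc c h)

lemma pvBinNat_binary (m : Nat) : ∀ c ∈ pvBinNat m, c = '0' ∨ c = '1' := by
  rw [pvBinNat]
  by_cases h : m = 0
  · simp [h]
  · simp only [h, if_false]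
    exact pvBinGo_binary m [] (by simp)

-- the per-candidate agreement: for a binary string, A's row test and B's agree
lemma pvRow_len (jam : List Char) (hbin : ∀ c ∈ jam, c = '0' ∨ c = '1') :
    ((pvInnerA jam (PySem.List.pyRange 2 11 1) [String.ofList jam]).length = 10
        ↔ (pvDivisorsB (pvAlt jam)).length = 9) ∧
      ((pvInnerA jam (PySem.List.pyRange 2 11 1) [String.ofList jam]).length = 10 →
        pvInnerA jam (PySem.List.pyRange 2 11 1) [String.ofList jam]
          = String.ofList jam :: pvDivisorsB (pvAlt jam)) := by
  have hr2 : PySem.List.pyRange 2 11 1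
      = List.map (fun m => m - 1) [3, 4, 5, 6, 7, 8, 9, 10, 11] := by decide
  have hr3 : PySem.List.pyRange 3 12 1 = [3, 4, 5, 6, 7, 8, 9, 10, 11] := by decide
  set N : List Int := [3, 4, 5, 6, 7, 8, 9, 10, 11] with hN
  set q : Int → Bool := fun m => decide (PySem.Int.mod (pvAlt jam) m = 0) with hq
  have hpq : (fun i : Int => decide (PySem.Int.mod (pvParse i jam) (i + 1) = 0))
        ∘ (fun m : Int => m - 1) = q := by
    funext m
    simp only [Function.comp_apply, hq]
    have hm : m - 1 + 1 = m := by ring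
    rw [hm]
    have h := pvCond_eq (m - 1) jam hbin
    rw [hm] at h
    exact decide_eq_decide.mpr h
  have hTW : pvInnerA jam (PySem.List.pyRange 2 11 1) [String.ofList jam]
      = [String.ofList jam] ++ ((N.takeWhile q).map (fun m => m - 1)).map
          (fun i => PySem.Int.toStr (i + 1)) := by
    rw [pvInnerA_eq, hr2, List.takeWhile_map, hpq]
  have hF : pvDivisorsB (pvAlt jam) = (N.filter q).map (fun m => PySem.Int.toStr m) := by
    rw [pvDivisorsB, hr3]
  have hTWiff : (N.takeWhile q).length = 9 ↔ ∀ m ∈ N, q m := by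
    constructor
    · intro h
      rw [← List.takeWhile_eq_self_iff]
      exact (List.takeWhile_prefix q).eq_of_length (by rw [h, hN]; rfl)
    · intro h
      rw [List.takeWhile_eq_self_iff.mpr h, hN]
      rfl
  have hFiff : (N.filter q).length = 9 ↔ ∀ m ∈ N, q m := by
    constructor
    · intro h
      rw [← List.filter_eq_self (p := q)]
      exact (List.filter_sublist (l := N) (p := q)).eq_of_length (by rw [h, hN]; rfl)
    · intro h
      rw [List.filter_eq_self.mpr h, hN]
      rfl
  constructor
  · rw [hTW, hF]
    simp only [List.length_append, List.length_map, List.length_cons, List.length_nil]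
    rw [← hTWiff] at *
    constructor
    · intro h; exact hFiff.mpr (hTWiff.mp (by omega))
    · intro h; have := hTWiff.mpr (hFiff.mp h); omega
  · intro hA
    have h9 : (N.takeWhile q).length = 9 := by
      rw [hTW] at hA
      simp only [List.length_append, List.length_map, List.length_cons, List.length_nil] at hA
      omega
    have hall : ∀ m ∈ N, q m := hTWiff.mp h9
    rw [hTW, hF, List.takeWhile_eq_self_iff.mpr hall, List.filter_eq_self.mpr hall,
      List.map_map]
    have : ((fun i : Int => PySem.Int.toStr (i + 1)) ∘ fun m : Int => m - 1)
        = fun m : Int => PySem.Int.toStr m := by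
      funext m
      simp only [Function.comp_apply]
      congr 1
      ring
    rw [this]
    rfl

-- candidates that pass the startswith('1') filter are binary strings
lemma pvJam_binary (n : Int)
    (hs : PySem.Chars.startswith (PySem.List.slice (pvPyBin n) (some 2) none) ['1'] = true) :
    ∀ c ∈ PySem.List.slice (pvPyBin n) (some 2) none, c = '0' ∨ c = '1' := by
  by_cases hn : n < 0
  · exfalso
    rw [pvPyBin, if_pos hn] at hs
    have h1 : PySem.List.slice ('-' :: '0' :: 'b' :: pvBinNat n.natAbs) (some 2) none
        = 'b' :: pvBinNat n.natAbs := by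
      have := PySem.List.slice_from_natCast ('-' :: '0' :: 'b' :: pvBinNat n.natAbs) 2
      simpa using this
    rw [h1, PySem.Chars.startswith_iff] at hs
    rcases hs with ⟨t, ht⟩
    simp at ht
  · rw [pvPyBin, if_neg hn]
    intro c hcmem
    have hsl : PySem.List.slice ('0' :: 'b' :: pvBinNat n.toNat) (some 2) none
        = pvBinNat n.toNat := by
      have := PySem.List.slice_from_natCast ('0' :: 'b' :: pvBinNat n.toNat) 2
      simpa using this
    rw [hsl] at hcmem
    exact pvBinNat_binary n.toNat c hcmem

-- the two while-loops advance in lockstep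
lemma pvLoop_eq (fuel : Nat) : ∀ (L num : Int) (retval : List (List String)) (inc : Int),
    pvLoopA L num fuel retval inc = pvLoopB num fuel retval (pvStart L + inc) := by
  induction fuel with
  | zero => intro L num retval inc; rfl
  | succ fuel ih =>
      intro L num retval inc
      rw [pvLoopA, pvLoopB]
      by_cases hlen : (retval.length : Int) < num
      · simp only [if_pos hlen]
        set n := pvStart L + inc with hn
        set jam := PySem.List.slice (pvPyBin n) (some 2) none with hjam
        by_cases hguard :
            (PySem.Chars.startswith jam ['1'] && PySem.Chars.endswith jam ['1']) = true
        · simp only [hguard, if_pos]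
          have hs : PySem.Chars.startswith jam ['1'] = true := by
            simpa using (Bool.and_eq_true _ _).mp hguard |>.1
          have hbin := pvJam_binary n hs
          obtain ⟨hiff, heq⟩ := pvRow_len jam hbin
          by_cases hA : (pvInnerA jam (PySem.List.pyRange 2 11 1) [String.ofList jam]).length = 10
          · have hB := hiff.mp hA
            have heqv := heq hA
            have hstep : n + 1 = pvStart L + (inc + 1) := by ring
            rw [if_pos hA, if_pos hB, heqv, ih, hstep]
          · have hB : ¬ (pvDivisorsB (pvAlt jam)).length = 9 := fun h => hA (hiff.mpr h)
            simp only [if_neg hA, if_neg hB]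
            have : n + 1 = pvStart L + (inc + 1) := by ring
            rw [ih, this]
        · simp only [hguard, Bool.false_eq_true, if_false]
          have : n + 1 = pvStart L + (inc + 1) := by ring
          rw [ih, this]
      · simp [hlen]

-- a loop whose entry guard already fails returns its accumulator unchanged
lemma pvLoopA_stop (L num : Int) (fuel : Nat) (inc : Int) (h : num ≤ 0) :
    pvLoopA L num fuel [] inc = [] := by
  cases fuel with
  | zero => rfl
  | succ fuel =>
      rw [pvLoopA]
      simp only [List.length_nil, Int.natCast_zero]
      rw [if_neg (by omega)]

-- ===== VERDICT (by name: the statement is the Claim_ definition above) =====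
theorem get_jamcoins_spec : Claim_equal_get_jamcoins := by
  intro L num _
  show get_jamcoins L num = get_jamcoins_alt L num
  by_cases h : num ≤ 0
  · rw [get_jamcoins, get_jamcoins_alt, if_pos h, pvLoopA_stop L num pvFuel 0 h]
  · rw [get_jamcoins, get_jamcoins_alt, if_neg h, pvLoop_eq]
    norm_num
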